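-- pv_equiv track=rewrite | github.com/ict-cspark/Algorithm | 프로그래머스/unrated/181921. 배열 만들기 2/배열 만들기 2.py | solution
-- ===== SOURCE A (Python) =====
-- def solution(l, r):
--     answer = []
--     for i in range(l, r + 1):
--         temp = set()
--         for s in str(i):
--             temp.add(s)
--         temp = list(temp)
--         if len(temp) > 2:
--             continue
--         else:
--             if '5' in temp or '0' in temp:
--                 if '5' in temp:
--                     temp.remove('5')
--                 if '0' in temp:
--                     temp.remove('0')
--                 if len(temp) == 0:
--                     answer.append(i)
--                 else:
--                     continue
--             else:
--                 continue
--
--     if answer == []: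
--         answer.append(-1)
--     return answer
-- ===== SOURCE B (Python) =====
-- def solution(l, r):
--     # Generate the numbers whose decimal digits are all 0 or 5 directly,
--     # level by digit-length, instead of scanning every integer in [l, r].
--     out = [0] if l <= 0 <= r else []
--     level = [5]
--     for _ in range(len(str(max(r, 0)))):
--         out += [v for v in level if l <= v <= r]
--         level = [10 * v + d for v in level for d in (0, 5)]
--     return out or [-1]
-- ===== Notes on version B (the rewrite author's own statement) =====
-- stated objective: faster
-- what changed: Instead of scanning every integer in [l,r] and testing its digit set via str/set, B generates the numbers made of digits 0 and 5 directly, level by digit-length, in ascending order and filters them to [l,r].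
import Mathlib
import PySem

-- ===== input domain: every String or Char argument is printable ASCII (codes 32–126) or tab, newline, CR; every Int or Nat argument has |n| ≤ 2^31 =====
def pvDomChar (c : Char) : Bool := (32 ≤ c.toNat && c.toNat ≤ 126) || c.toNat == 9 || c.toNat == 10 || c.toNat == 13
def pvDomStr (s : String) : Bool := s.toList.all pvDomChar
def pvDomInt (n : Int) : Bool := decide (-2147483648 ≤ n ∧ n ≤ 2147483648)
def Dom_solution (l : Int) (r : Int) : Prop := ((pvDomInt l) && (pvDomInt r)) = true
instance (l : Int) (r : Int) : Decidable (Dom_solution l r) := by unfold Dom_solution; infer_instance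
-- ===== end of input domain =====

-- B generates the numbers whose decimal digits are all 0/5 directly (level by digit-length, in
-- ascending order) and filters them to [l, r], instead of A's scan of every integer in [l, r].


-- ===== PORT A =====
-- transliteration of A: scan range(l, r+1); build the set of digit characters of str(i);
-- keep i iff after removing '5' and '0' the (listed) set is empty.
def solution (l : Int) (r : Int) : List Int :=
  let answer : List Int :=
    (PySem.List.pyRange l (r + 1) 1).foldl (fun answer i =>
      let temp : PySem.Set Char :=
        (PySem.Int.toChars i).foldl PySem.Set.add PySem.Set.empty
      let tempL : List Char := temp          -- temp = list(temp); only len/membership/remove used below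
      if tempL.length > 2 then answer
      else
        if tempL.contains '5' || tempL.contains '0' then
          let t1 := if tempL.contains '5' then (PySem.List.remove? tempL '5').getD tempL else tempL
          let t2 := if t1.contains '0' then (PySem.List.remove? t1 '0').getD t1 else t1
          if t2.length = 0 then answer ++ [i] else answer
        else answer) []
  if answer = [] then [-1] else answer

-- ===== PORT B =====
-- transliteration of Source B: out = [0] if l<=0<=r; level = [5]; len(str(max(r,0))) rounds of
-- (collect level members in [l,r]; level = children 10*v+d, d in (0,5)); out or [-1].
def solution_alt (l : Int) (r : Int) : List Int :=
  let out0 : List Int := if l ≤ 0 ∧ 0 ≤ r then [0] else []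
  let n : Int := PySem.Str.len (PySem.Int.toStr (max r 0))
  let p : List Int × List Int :=
    (List.range n.toNat).foldl (fun (p : List Int × List Int) _ =>
      (p.1 ++ p.2.filter (fun v => decide (l ≤ v ∧ v ≤ r)),
       p.2.flatMap (fun v => [10 * v + 0, 10 * v + 5]))) (out0, [5])
  if p.1 = [] then [-1] else p.1

-- ===== PRECONDITION & SPEC =====
def Spec_solution (l : Int) (r : Int) (out : List Int) : Prop := out = solution_alt l r
instance (l : Int) (r : Int) (out : List Int) : Decidable (Spec_solution l r out) := by unfold Spec_solution; infer_instance

-- ===== CLAIM (what is proved, stated in full; the proofs are below) =====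
def Claim_equal_solution : Prop := ∀ (l : Int) (r : Int), Dom_solution l r → Spec_solution l r (solution l r)

-- ===== LEMMAS AND PROOFS =====

-- "every character of str(i) is '0' or '5'" — the predicate A effectively filters by
def pvGood (i : Int) : Bool := (PySem.Int.toChars i).all (fun c => c == '0' || c == '5')

-- the same predicate on the digit characters of a natural number
def pvQ (n : Nat) : Bool := (Nat.toDigits 10 n).all (fun c => c == '0' || c == '5')

-- the e-th level of B's generation: it holds exactly the good numbers with e+1 digits
def pvLvl : Nat → List Int
  | 0 => [5]
  | e + 1 => (pvLvl e).flatMap (fun v => [10 * v + 0, 10 * v + 5])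

lemma pvQ_lt10 {n : Nat} (h : n < 10) : pvQ n = true ↔ n = 0 ∨ n = 5 := by
  unfold pvQ
  rw [Nat.toDigits_of_lt_base h]
  interval_cases n <;> simp <;> decide

lemma pvQ_ge10 {n : Nat} (h : 10 ≤ n) :
    pvQ n = true ↔ (pvQ (n / 10) = true ∧ (n % 10 = 0 ∨ n % 10 = 5)) := by
  unfold pvQ
  rw [Nat.toDigits_eq_if (by norm_num)]
  rw [if_neg (by omega)]
  have h10 : n % 10 < 10 := Nat.mod_lt _ (by norm_num)
  simp only [List.all_append, List.all_cons, List.all_nil, Bool.and_true, Bool.and_eq_true]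
  constructor
  · rintro ⟨h1, h2⟩
    refine ⟨h1, ?_⟩
    revert h2; interval_cases (n % 10) <;> simp <;> decide
  · rintro ⟨h1, h2⟩
    refine ⟨h1, ?_⟩
    rcases h2 with h2 | h2 <;> rw [h2] <;> rfl

lemma pvGood_nonneg (i : Int) (h : 0 ≤ i) : pvGood i = (pvQ i.toNat) := by
  unfold pvGood pvQ PySem.Int.toChars
  rw [if_neg (by omega)]

lemma pvGood_neg (i : Int) (h : i < 0) : pvGood i = false := by
  unfold pvGood PySem.Int.toChars
  rw [if_pos h]
  simp

lemma pvLvl_mem (e : Nat) (v : Int) :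
    v ∈ pvLvl e ↔ (pvGood v = true ∧ (10:Int)^e ≤ v ∧ v < (10:Int)^(e+1)) := by
  induction e generalizing v with
  | zero =>
    simp only [pvLvl, List.mem_singleton, pow_zero]
    constructor
    · rintro rfl; refine ⟨by decide, by norm_num, by norm_num⟩
    · rintro ⟨hg, h1, h2⟩
      have h0 : (0:Int) ≤ v := by omega
      rw [pvGood_nonneg v h0] at hg
      have hlt : v.toNat < 10 := by omega
      have := (pvQ_lt10 hlt).mp hg
      omega
  | succ e ih =>
    have hPpos : (1:Int) ≤ (10:Int)^e := one_le_pow₀ (by norm_num)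
    simp only [pvLvl, List.mem_flatMap, List.mem_cons]
    constructor
    · rintro ⟨w, hw, hv⟩
      obtain ⟨hg, hlo, hhi⟩ := (ih w).mp hw
      have hw0 : (0:Int) ≤ w := by omega
      have hd : v = 10 * w + 0 ∨ v = 10 * w + 5 := by
        rcases hv with h | h | h
        · left; omega
        · right; omega
        · exact absurd h (by simp)
      have hv0 : (0:Int) ≤ v := by rcases hd with h | h <;> omega
      have hv10 : (10:Int) ≤ v := by rcases hd with h | h <;> omega
      refine ⟨?_, ?_, ?_⟩
      · rw [pvGood_nonneg v hv0]
        rw [pvQ_ge10 (by omega)]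
        rw [pvGood_nonneg w hw0] at hg
        constructor
        · have hdiv : v.toNat / 10 = w.toNat := by rcases hd with h | h <;> omega
          rw [hdiv]; exact hg
        · rcases hd with h | h
          · left; omega
          · right; omega
      · rw [pow_succ]
        rcases hd with h | h <;> nlinarith
      · rw [pow_succ, pow_succ] at *
        rcases hd with h | h <;> nlinarith
    · rintro ⟨hg, hlo, hhi⟩
      have hv0 : (0:Int) ≤ v := le_trans (by positivity) hlo
      have hv10 : (10:Int) ≤ v := by rw [pow_succ] at hlo; nlinarith
      set w : Int := v / 10 with hwdef
      have hmod : v % 10 = v - 10 * w := by omega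
      have hd : 0 ≤ v % 10 ∧ v % 10 < 10 := by omega
      rw [pvGood_nonneg v hv0, pvQ_ge10 (by omega)] at hg
      obtain ⟨hq, hd05⟩ := hg
      have hdiv : v.toNat / 10 = w.toNat := by omega
      rw [hdiv] at hq
      have hwmem : w ∈ pvLvl e := by
        rw [ih w]
        refine ⟨by rw [pvGood_nonneg w (by omega)]; exact hq, ?_, ?_⟩
        · rw [pow_succ] at hlo; generalize (10:Int)^e = P at *; omega
        · rw [pow_succ, pow_succ] at hhi; rw [pow_succ]; generalize (10:Int)^e = P at *; omega
      refine ⟨w, hwmem, ?_⟩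
      rcases hd05 with h | h
      · left; omega
      · right; left; omega

lemma pvLvl_pairwise (e : Nat) : (pvLvl e).Pairwise (· < ·) := by
  induction e with
  | zero => simp [pvLvl]
  | succ e ih =>
    show ((pvLvl e).flatMap (fun v => [10 * v + 0, 10 * v + 5])).Pairwise (· < ·)
    rw [List.pairwise_flatMap]
    refine ⟨fun a _ => by simp, ?_⟩
    refine ih.imp ?_
    intro a b hab x hx y hy
    simp only [List.mem_cons, List.not_mem_nil, or_false] at hx hy
    rcases hx with rfl | rfl <;> rcases hy with rfl | rfl <;> omega

-- unrolling B's fold: first component collects the filtered levels, second is the next level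
lemma pvBfold (l r : Int) (n : Nat) (out0 : List Int) :
    (List.range n).foldl (fun (p : List Int × List Int) _ =>
      (p.1 ++ p.2.filter (fun v => decide (l ≤ v ∧ v ≤ r)),
       p.2.flatMap (fun v => [10 * v + 0, 10 * v + 5]))) (out0, [5]) =
    (out0 ++ (List.range n).flatMap (fun e => (pvLvl e).filter (fun v => decide (l ≤ v ∧ v ≤ r))),
     pvLvl n) := by
  induction n with
  | zero => simp [pvLvl]
  | succ n ih =>
    rw [List.range_succ, List.foldl_append, ih]
    simp [pvLvl]

-- B runs len(str(max(r,0))) levels — the digit count of r.toNat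
lemma pvN_spec (r : Int) :
    (PySem.Str.len (PySem.Int.toStr (max r 0))).toNat = (Nat.toDigits 10 r.toNat).length := by
  rw [PySem.Str.len_eq, PySem.Int.toList_toStr]
  unfold PySem.Int.toChars
  rw [if_neg (by omega)]
  have h : (max r 0).toNat = r.toNat := by omega
  rw [h]
  omega

-- the central fact: A's filtered scan of [l, r] IS B's filtered level-by-level generation
lemma pvMain (l r : Int) :
    (PySem.List.pyRange l (r + 1) 1).filter pvGood =
      (if l ≤ 0 ∧ 0 ≤ r then [0] else []) ++
        (List.range ((PySem.Str.len (PySem.Int.toStr (max r 0))).toNat)).flatMap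
          (fun e => (pvLvl e).filter (fun v => decide (l ≤ v ∧ v ≤ r))) := by
  rw [pvN_spec]
  set N := (Nat.toDigits 10 r.toNat).length with hN
  have hNpos : 0 < N := Nat.length_toDigits_pos
  have hrN : r.toNat < 10 ^ N := by
    rw [← Nat.length_toDigits_le_iff (by norm_num) hNpos]
  -- both sides are strictly increasing lists with the same members
  have hpw1 : ((PySem.List.pyRange l (r + 1) 1).filter pvGood).Pairwise (· < ·) :=
    (PySem.List.pairwise_lt_pyRange_one l (r + 1)).filter _
  have hpw2 : ((if l ≤ 0 ∧ 0 ≤ r then [0] else []) ++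
      (List.range N).flatMap
        (fun e => (pvLvl e).filter (fun v => decide (l ≤ v ∧ v ≤ r)))).Pairwise (· < ·) := by
    rw [List.pairwise_append]
    refine ⟨by split <;> simp, ?_, ?_⟩
    · rw [List.pairwise_flatMap]
      refine ⟨fun e _ => (pvLvl_pairwise e).filter _, ?_⟩
      refine (List.pairwise_lt_range).imp ?_
      · intro e1 e2 h12 x hx y hy
        rw [List.mem_filter] at hx hy
        obtain ⟨_, _, hx2⟩ := (pvLvl_mem e1 x).mp hx.1
        obtain ⟨_, hy1, _⟩ := (pvLvl_mem e2 y).mp hy.1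
        calc x < (10:Int)^(e1+1) := hx2
          _ ≤ (10:Int)^e2 := pow_le_pow_right₀ (by norm_num) (by omega)
          _ ≤ y := hy1
    · intro a ha b hb
      have ha0 : a = 0 := by revert ha; split <;> simp_all
      rw [List.mem_flatMap] at hb
      obtain ⟨e, _, hbm⟩ := hb
      rw [List.mem_filter] at hbm
      obtain ⟨_, hb1, _⟩ := (pvLvl_mem e b).mp hbm.1
      have : (1:Int) ≤ (10:Int)^e := one_le_pow₀ (by norm_num)
      omega
  refine List.Perm.eq_of_pairwise (fun a b _ _ h1 h2 => by omega) hpw1 hpw2 ?_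
  rw [List.perm_ext_iff_of_nodup (hpw1.imp fun h => by omega) (hpw2.imp fun h => by omega)]
  intro a
  rw [List.mem_filter, PySem.List.mem_pyRange_one, List.mem_append, List.mem_flatMap]
  constructor
  · rintro ⟨⟨hl, hr⟩, hg⟩
    have har : a ≤ r := by omega
    rcases lt_trichotomy a 0 with hneg | rfl | hpos
    · rw [pvGood_neg a hneg] at hg; exact absurd hg (by simp)
    · left; split
      · simp
      · next hcon => exact absurd ⟨hl, by omega⟩ hcon
    · right
      set e := Nat.log 10 a.toNat with he
      have h1 : 10 ^ e ≤ a.toNat := Nat.pow_log_le_self 10 (by omega)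
      have h2 : a.toNat < 10 ^ (e + 1) := Nat.lt_pow_succ_log_self (by norm_num) _
      have heN : e < N := by
        have hlt : (10:Nat) ^ e < 10 ^ N := by omega
        exact (Nat.pow_lt_pow_iff_right (by norm_num)).mp hlt
      refine ⟨e, List.mem_range.mpr heN, ?_⟩
      rw [List.mem_filter, pvLvl_mem]
      have hc1 : (10:Int)^e ≤ a := by
        have h' : ((10:Nat)^e : Int) ≤ (a.toNat : Int) := by exact_mod_cast h1
        push_cast at h'
        omega
      have hc2 : a < (10:Int)^(e+1) := by
        have h' : (a.toNat : Int) < ((10:Nat)^(e+1) : Int) := by exact_mod_cast h2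
        push_cast at h'
        omega
      exact ⟨⟨hg, hc1, hc2⟩, by simp; omega⟩
  · rintro (ha | ⟨e, _, ham⟩)
    · have h' : a = 0 ∧ l ≤ 0 ∧ 0 ≤ r := by revert ha; split <;> simp_all
      obtain ⟨rfl, h1, h2⟩ := h'
      exact ⟨⟨h1, by omega⟩, by decide⟩
    · rw [List.mem_filter, pvLvl_mem] at ham
      obtain ⟨⟨hg, _, _⟩, hir⟩ := ham
      simp at hir
      exact ⟨⟨hir.1, by omega⟩, hg⟩

-- membership survives list.remove of a different element
lemma pvMem_removeD {xs : List Char} {c x : Char} (hc : c ∈ xs) (hne : c ≠ x) :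
    c ∈ (PySem.List.remove? xs x).getD xs := by
  unfold PySem.List.remove?
  cases h : List.idxOf? x xs with
  | none => simpa using hc
  | some k =>
    simp only [Option.map_some, Option.getD_some]
    obtain ⟨hk, hxk, _⟩ := List.idxOf?_eq_some_iff.mp h
    obtain ⟨i, hi, hic⟩ := List.mem_iff_getElem.mp hc
    rw [List.mem_eraseIdx_iff_getElem]
    refine ⟨i, hi, fun he => hne ?_, hic⟩
    subst he; rw [hic] at hxk; exact hxk ▸ rfl

-- a nonempty duplicate-free list over the alphabet {'0','5'} has one of four shapes
lemma pvShape (s : List Char) (hnd : s.Nodup) (hne : s ≠ [])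
    (hall : ∀ c ∈ s, c = '0' ∨ c = '5') :
    s = ['0'] ∨ s = ['5'] ∨ s = ['0', '5'] ∨ s = ['5', '0'] := by
  match s with
  | [] => exact absurd rfl hne
  | [a] =>
    rcases hall a (by simp) with rfl | rfl
    · exact Or.inl rfl
    · exact Or.inr (Or.inl rfl)
  | [a, b] =>
    have hab : a ≠ b := by simp [List.nodup_cons] at hnd; exact hnd
    rcases hall a (by simp) with rfl | rfl <;> rcases hall b (by simp) with rfl | rfl
    · exact absurd rfl hab
    · exact Or.inr (Or.inr (Or.inl rfl))
    · exact Or.inr (Or.inr (Or.inr rfl))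
    · exact absurd rfl hab
  | a :: b :: c :: t =>
    exfalso
    simp only [List.nodup_cons, List.mem_cons, not_or] at hnd
    obtain ⟨⟨hab, hac, _⟩, ⟨hbc, _⟩, _⟩ := hnd
    rcases hall a (by simp) with rfl | rfl <;>
      rcases hall b (by simp) with rfl | rfl <;>
      rcases hall c (by simp) with rfl | rfl <;> simp_all

lemma pvToChars_ne_nil (i : Int) : PySem.Int.toChars i ≠ [] := by
  unfold PySem.Int.toChars
  split
  · simp
  · exact List.ne_nil_of_length_pos Nat.length_toDigits_pos

-- A's loop body appends i exactly when every character of str(i) is '0' or '5'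
lemma pvBody_eval (ans : List Int) (i : Int) :
    (let temp : PySem.Set Char :=
        (PySem.Int.toChars i).foldl PySem.Set.add PySem.Set.empty
     let tempL : List Char := temp
     if tempL.length > 2 then ans
     else
       if tempL.contains '5' || tempL.contains '0' then
         let t1 := if tempL.contains '5' then (PySem.List.remove? tempL '5').getD tempL else tempL
         let t2 := if t1.contains '0' then (PySem.List.remove? t1 '0').getD t1 else t1
         if t2.length = 0 then ans ++ [i] else ans
       else ans)
    = if pvGood i = true then ans ++ [id i] else ans := by
  have hofl : (PySem.Int.toChars i).foldl PySem.Set.add PySem.Set.empty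
      = PySem.Set.ofList (PySem.Int.toChars i) := (PySem.Set.ofList_eq_foldl _).symm
  simp only [hofl]
  set cs := PySem.Int.toChars i with hcsdef
  set s : List Char := PySem.Set.ofList cs with hsdef
  by_cases hg : pvGood i = true
  · rw [if_pos hg]
    have hall : ∀ c ∈ s, c = '0' ∨ c = '5' := by
      intro c hc
      rw [hsdef, PySem.Set.mem_ofList] at hc
      have := List.all_eq_true.mp hg c hc
      simpa using this
    have hnd : s.Nodup := hsdef ▸ PySem.Set.nodup_ofList cs
    have hsne : s ≠ [] := by
      cases hcs : cs with
      | nil => exact absurd (hcsdef ▸ hcs) (pvToChars_ne_nil i)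
      | cons a t =>
        intro h
        have ha : a ∈ s := by rw [hsdef, PySem.Set.mem_ofList, hcs]; simp
        rw [h] at ha; simp at ha
    rcases pvShape s hnd hsne hall with h | h | h | h <;> rw [h] <;> rfl
  · rw [if_neg hg]
    have hex : ∃ c ∈ cs, ¬(c == '0' || c == '5') = true := by
      have hfalse : cs.all (fun c => c == '0' || c == '5') = false := by
        have h' : pvGood i = false := eq_false_of_ne_true hg
        simpa [pvGood] using h'
      simpa using List.all_eq_false.mp hfalse
    obtain ⟨c, hcmem, hc⟩ := hex
    have hc0 : c ≠ '0' := by intro h; subst h; simp at hc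
    have hc5 : c ≠ '5' := by intro h; subst h; simp at hc
    have hcs' : c ∈ s := by rw [hsdef, PySem.Set.mem_ofList]; exact hcmem
    by_cases h2 : s.length > 2
    · rw [if_pos h2]
    · rw [if_neg h2]
      by_cases h50 : (s.contains '5' || s.contains '0') = true
      · rw [if_pos h50]
        set t1 : List Char :=
          if s.contains '5' = true then (PySem.List.remove? s '5').getD s else s with ht1
        have hct1 : c ∈ t1 := by
          rw [ht1]; split
          · exact pvMem_removeD hcs' hc5
          · exact hcs'
        set t2 : List Char :=
          if t1.contains '0' = true then (PySem.List.remove? t1 '0').getD t1 else t1 with ht2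
        have hct2 : c ∈ t2 := by
          rw [ht2]; split
          · exact pvMem_removeD hct1 hc0
          · exact hct1
        rw [if_neg]
        intro h
        rw [List.length_eq_zero_iff] at h
        rw [h] at hct2; simp at hct2
      · rw [if_neg h50]

-- A is the filtered scan
lemma pvBodyA_eq (l r : Int) :
    solution l r =
      (let answer := ((PySem.List.pyRange l (r + 1) 1).filter pvGood);
       if answer = [] then [-1] else answer) := by
  unfold solution
  have hfun := funext (fun ans : List Int => funext (fun i : Int => pvBody_eval ans i))
  rw [hfun, PySem.List.foldl_append_if, List.map_id, List.nil_append]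

-- ===== VERDICT (by name: the statement is the Claim_ definition above) =====
theorem solution_spec : Claim_equal_solution := by
  intro l r _
  show solution l r = solution_alt l r
  rw [pvBodyA_eq]
  simp only [solution_alt, pvBfold, pvMain l r]
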